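-- pv_equiv track=rewrite | github.com/PeopleAndService/AlgorithmStudy | yoongyeong/by_python/Programmers/complete_exploration/mock_test.py | solution
-- ===== SOURCE A (Python) =====
-- def solution(answers):
--     answer = [[0, -1], [0, -2], [0, -3]]
--     student1 = [1, 2, 3, 4, 5] * 8
--     student2 = [2, 1, 2, 3, 2, 4, 2, 5] * 5
--     student3 = [3, 3, 1, 1, 2, 2, 4, 4, 5, 5] * 4
--
--     index = 0
--     for a in answers:
--         if index == 40: index = 0
--         if student1[index] == a:
--             answer[0][0] += 1
--         if student2[index] == a:
--             answer[1][0] += 1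
--         if student3[index] == a:
--             answer[2][0] += 1
--         index += 1
--     answer.sort(reverse=True)
--     result = []
--     maxi = answer[0][0]
--     for a in answer:
--         if a[0] != maxi: break
--         result.append(-a[1])
--     return result
-- ===== SOURCE B (Python) =====
-- def solution(answers):
--     # One-pass histogram of (position mod 40, answer); each student's score is then
--     # 40 dict lookups along their pattern, independent of len(answers).
--     cnt = {}
--     for i, a in enumerate(answers):
--         k = (i % 40, a)
--         cnt[k] = cnt.get(k, 0) + 1
--     patterns = [
--         [1, 2, 3, 4, 5] * 8,
--         [2, 1, 2, 3, 2, 4, 2, 5] * 5,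
--         [3, 3, 1, 1, 2, 2, 4, 4, 5, 5] * 4,
--     ]
--     scores = [sum(cnt.get((i, p[i]), 0) for i in range(40)) for p in patterns]
--     best = max(scores)
--     return [i + 1 for i in range(3) if scores[i] == best]
-- ===== Notes on version B (the rewrite author's own statement) =====
-- stated objective: alternative
-- what changed: Instead of comparing each answer against the three patterns while scanning (A's interleaved loop with a manual index reset, [score,-id] pairs and a reverse-sort), B builds a histogram keyed by (position mod 40, answer) in one pass and then scores each student with 40 dictionary lookups along their pattern, picking winners with max plus a filter.
import Mathlib
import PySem

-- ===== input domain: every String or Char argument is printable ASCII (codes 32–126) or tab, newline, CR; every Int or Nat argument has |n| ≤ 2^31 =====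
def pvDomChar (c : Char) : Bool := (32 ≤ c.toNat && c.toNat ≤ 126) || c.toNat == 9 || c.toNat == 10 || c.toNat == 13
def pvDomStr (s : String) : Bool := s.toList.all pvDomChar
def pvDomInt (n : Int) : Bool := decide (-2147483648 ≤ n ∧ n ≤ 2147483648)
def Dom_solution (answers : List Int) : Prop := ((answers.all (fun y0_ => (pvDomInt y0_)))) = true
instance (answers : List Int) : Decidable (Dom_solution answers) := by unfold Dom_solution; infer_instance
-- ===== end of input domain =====

-- B replaces A's interleaved per-answer comparison against three patterns (manual index reset,
-- [score,-id] pairs, reverse-sort, break loop) by a one-pass histogram keyed by (position mod 40,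
-- answer) followed by 40 dictionary lookups per student plus max/filter; same O(n) cost.


-- ===== PORT A =====
def studentA1 : List Int := PySem.List.pyRepeat [1, 2, 3, 4, 5] 8
def studentA2 : List Int := PySem.List.pyRepeat [2, 1, 2, 3, 2, 4, 2, 5] 5
def studentA3 : List Int := PySem.List.pyRepeat [3, 3, 1, 1, 2, 2, 4, 4, 5, 5] 4

-- the for-loop over answers: state = (index, answer[0][0], answer[1][0], answer[2][0])
def loopA : List Int → Int → Int → Int → Int → Int × Int × Int
  | [], _, c1, c2, c3 => (c1, c2, c3)
  | a :: rest, index, c1, c2, c3 =>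
    let index := if index == 40 then 0 else index
    let c1 := if PySem.List.pyGetD studentA1 index 0 == a then c1 + 1 else c1
    let c2 := if PySem.List.pyGetD studentA2 index 0 == a then c2 + 1 else c2
    let c3 := if PySem.List.pyGetD studentA3 index 0 == a then c3 + 1 else c3
    loopA rest (index + 1) c1 c2 c3

-- the result loop with its break
def pickA (maxi : Int) : List (Int × Int) → List Int
  | [] => []
  | a :: rest => if a.1 ≠ maxi then [] else (-a.2) :: pickA maxi rest

def solution (answers : List Int) : List Int :=
  let c := loopA answers 0 0 0 0
  let answer := PySem.List.sorted2 [(c.1, -1), (c.2.1, -2), (c.2.2, -3)]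
      (fun x => x.1) (fun x => x.2) true
  let maxi := (PySem.List.pyGetD answer 0 (0, 0)).1
  pickA maxi answer

-- ===== PORT B =====
def patternsB : List (List Int) :=
  [PySem.List.pyRepeat [1, 2, 3, 4, 5] 8,
   PySem.List.pyRepeat [2, 1, 2, 3, 2, 4, 2, 5] 5,
   PySem.List.pyRepeat [3, 3, 1, 1, 2, 2, 4, 4, 5, 5] 4]

-- cnt = {}; for i, a in enumerate(answers): k = (i % 40, a); cnt[k] = cnt.get(k, 0) + 1
def cntB (answers : List Int) : PySem.Dict (Int × Int) Int :=
  (PySem.List.enumerate answers 0).foldl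
    (fun d ia =>
      let k : Int × Int := (PySem.Int.mod ia.1 40, ia.2)
      d.insert k (d.getD k 0 + 1))
    PySem.Dict.empty

-- sum(cnt.get((i, p[i]), 0) for i in range(40))
def scoreB (cnt : PySem.Dict (Int × Int) Int) (p : List Int) : Int :=
  ((PySem.List.pyRange 0 40 1).map
    (fun i => cnt.getD (i, PySem.List.pyGetD p i 0) 0)).sum

def solution_alt (answers : List Int) : List Int :=
  let cnt := cntB answers
  let scores := patternsB.map (fun p => scoreB cnt p)
  let best := (PySem.List.max? scores (fun x => x)).getD 0
  ((PySem.List.pyRange 0 3 1).filter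
      (fun i => PySem.List.pyGetD scores i 0 == best)).map (· + 1)

-- ===== PRECONDITION & SPEC =====
def Spec_solution (answers : List Int) (out : List Int) : Prop := out = solution_alt answers
instance (answers : List Int) (out : List Int) : Decidable (Spec_solution answers out) := by unfold Spec_solution; infer_instance

-- ===== CLAIM (what is proved, stated in full; the proofs are below) =====
def Claim_equal_solution : Prop := ∀ (answers : List Int), Dom_solution answers → Spec_solution answers (solution answers)

-- ===== LEMMAS AND PROOFS =====

-- running score of a pattern starting at position j (indices taken mod 40)
def S (p : List Int) (j : Int) : List Int → Int
  | [] => 0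
  | a :: xs => (if PySem.List.pyGetD p (PySem.Int.mod j 40) 0 == a then 1 else 0) + S p (j + 1) xs

lemma S_period (p : List Int) : ∀ (xs : List Int) (j : Int), S p (j + 40) xs = S p j xs := by
  intro xs
  induction xs with
  | nil => intro j; simp [S]
  | cons a xs ih =>
    intro j
    have hmod : PySem.Int.mod (j + 40) 40 = PySem.Int.mod j 40 := by
      rw [PySem.Int.mod_eq_emod_of_pos (by omega : (0:Int) < 40), PySem.Int.mod_eq_emod_of_pos (by omega : (0:Int) < 40)]
      omega
    have : j + 40 + 1 = (j + 1) + 40 := by ring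
    simp [S, this, ih]

lemma loopA_S : ∀ (xs : List Int) (j c1 c2 c3 : Int), 0 ≤ j → j ≤ 40 →
    loopA xs j c1 c2 c3 =
      (c1 + S studentA1 (if j == 40 then 0 else j) xs,
       c2 + S studentA2 (if j == 40 then 0 else j) xs,
       c3 + S studentA3 (if j == 40 then 0 else j) xs) := by
  intro xs
  induction xs with
  | nil => intro j c1 c2 c3 _ _; simp [loopA, S]
  | cons a xs ih =>
    intro j c1 c2 c3 h0 h40
    set j' : Int := if j == 40 then 0 else j with hj'
    have hj'0 : 0 ≤ j' := by by_cases h : j = 40 <;> simp [hj', h] <;> omega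
    have hj'lt : j' < 40 := by by_cases h : j = 40 <;> simp [hj', h]; omega
    have hmod : PySem.Int.mod j' 40 = j' := by
      rw [PySem.Int.mod_eq_emod_of_pos (by omega : (0:Int) < 40)]; omega
    have hstep : ∀ p : List Int, S p (j' + 1) xs = S p (if (j' + 1 : Int) == 40 then 0 else j' + 1) xs := by
      intro p
      by_cases h : (j' + 1 : Int) = 40
      · have h0' := S_period p xs 0
        simp only [zero_add] at h0'
        simp [h, h0']
      · simp [h]
    show loopA (a :: xs) j c1 c2 c3 = _
    rw [loopA]
    rw [ih (j' + 1) _ _ _ (by omega) (by omega)]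
    simp only [← hj', S, hmod, ← hstep]
    by_cases e1 : PySem.List.pyGetD studentA1 j' 0 = a <;>
      by_cases e2 : PySem.List.pyGetD studentA2 j' 0 = a <;>
        by_cases e3 : PySem.List.pyGetD studentA3 j' 0 = a <;>
          simp [e1, e2, e3] <;> ring_nf <;> simp [Prod.ext_iff] <;> constructor <;> ring

-- sum of a pointwise sum of maps splits
lemma sum_map_add {α : Type} (l : List α) (f g : α → Int) :
    (l.map (fun x => f x + g x)).sum = (l.map f).sum + (l.map g).sum := by
  induction l with
  | nil => simp
  | cons x l ih => simp [ih]; ring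

-- the indicator column for one recorded key (m, a), summed along a pattern row
lemma count_mul (p : List Int) (m a : Int) : ∀ l : List Int,
    (l.map (fun i => if ((m, a) : Int × Int) == (i, PySem.List.pyGetD p i 0) then (1 : Int) else 0)).sum
      = (l.count m : Int) * (if PySem.List.pyGetD p m 0 == a then 1 else 0) := by
  intro l
  induction l with
  | nil => simp
  | cons i l ih =>
    rw [List.map_cons, List.sum_cons, ih, List.count_cons]
    by_cases hi : m = i
    · subst hi
      by_cases ha : PySem.List.pyGetD p m 0 = a
      · simp only [beq_iff_eq, Prod.mk.injEq, ha, and_true, eq_self_iff_true, true_and, if_true, if_pos rfl]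
        push_cast
        ring
      · have hne : a ≠ PySem.List.pyGetD p m 0 := fun h => ha h.symm
        simp only [beq_iff_eq, Prod.mk.injEq, ha, true_and, if_neg hne, if_false]
        push_cast
        ring
    · have hpair : ¬ (m = i ∧ a = PySem.List.pyGetD p i 0) := fun h => hi h.1
      simp only [beq_iff_eq, Prod.mk.injEq, if_neg hpair, if_neg (fun h : i = m => hi h.symm)]
      push_cast
      ring

lemma count_range40 (m : Int) (h0 : 0 ≤ m) (h1 : m < 40) :
    (PySem.List.pyRange 0 40 1).count m = 1 := by
  interval_cases m <;> decide

-- summing the histogram of (index mod 40, answer) along a pattern row computes the score S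
lemma sum_count_S (p : List Int) : ∀ (xs : List Int) (s : Int), 0 ≤ s →
    ((PySem.List.pyRange 0 40 1).map
      (fun i => ((((PySem.List.enumerate xs s).map
          (fun ia => ((PySem.Int.mod ia.1 40, ia.2) : Int × Int))).count
            (i, PySem.List.pyGetD p i 0) : Nat) : Int))).sum
      = S p s xs := by
  intro xs
  induction xs with
  | nil => intro s _; simp [PySem.List.enumerate, S]
  | cons a xs ih =>
    intro s hs
    have hm0 : 0 ≤ PySem.Int.mod s 40 ∧ PySem.Int.mod s 40 < 40 := by
      rw [PySem.Int.mod_eq_emod_of_pos (by omega : (0:Int) < 40)]; omega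
    rw [S, ← ih (s + 1) (by omega)]
    simp only [PySem.List.enumerate, List.map_cons, List.count_cons]
    have hsplit :
        ((PySem.List.pyRange 0 40 1).map
          (fun i => ((((PySem.List.enumerate xs (s+1)).map
              (fun ia => ((PySem.Int.mod ia.1 40, ia.2) : Int × Int))).count
                (i, PySem.List.pyGetD p i 0) +
              (if ((PySem.Int.mod s 40, a) : Int × Int) == (i, PySem.List.pyGetD p i 0) then 1 else 0) : Nat) : Int))).sum
        = ((PySem.List.pyRange 0 40 1).map
            (fun i => ((((PySem.List.enumerate xs (s+1)).map
                (fun ia => ((PySem.Int.mod ia.1 40, ia.2) : Int × Int))).count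
                  (i, PySem.List.pyGetD p i 0) : Nat) : Int))).sum +
          ((PySem.List.pyRange 0 40 1).map
            (fun i => if ((PySem.Int.mod s 40, a) : Int × Int) == (i, PySem.List.pyGetD p i 0) then (1:Int) else 0)).sum := by
      rw [← sum_map_add]
      refine congrArg List.sum (List.map_congr_left ?_)
      intro i _
      push_cast
      split <;> simp
    rw [hsplit, count_mul, count_range40 _ hm0.1 hm0.2]
    push_cast
    ring

-- the histogram lookup is a count over the recorded keys
lemma cntB_getD (answers : List Int) (v : Int × Int) :
    (cntB answers).getD v 0 =
      (((PySem.List.enumerate answers 0).map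
        (fun ia => ((PySem.Int.mod ia.1 40, ia.2) : Int × Int))).count v : Int) := by
  have hfold : cntB answers =
      ((PySem.List.enumerate answers 0).map
        (fun ia => ((PySem.Int.mod ia.1 40, ia.2) : Int × Int))).foldl
        (fun d k => d.insert k (d.getD k 0 + 1)) PySem.Dict.empty := by
    unfold cntB
    rw [List.foldl_map]
  rw [hfold, PySem.Dict.getD_foldl_insert_add_one]
  simp

lemma scoreB_eq_S (answers p : List Int) : scoreB (cntB answers) p = S p 0 answers := by
  unfold scoreB
  simp only [cntB_getD]
  exact sum_count_S p answers 0 le_rfl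

-- the whole tail of both programs as a function of the three scores
set_option maxRecDepth 4096 in
lemma finish_eq (s1 s2 s3 : Int) :
    (let answer := PySem.List.sorted2 [(s1, -1), (s2, -2), (s3, -3)]
        (fun x => x.1) (fun x => x.2) true
     pickA (PySem.List.pyGetD answer 0 (0, 0)).1 answer) =
    (let scores := [s1, s2, s3]
     let best := (PySem.List.max? scores (fun x => x)).getD 0
     ((PySem.List.pyRange 0 3 1).filter
        (fun i => PySem.List.pyGetD scores i 0 == best)).map (· + 1)) := by
  have hr : PySem.List.pyRange 0 3 1 = [0, 1, 2] := by decide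
  simp only [hr, PySem.List.max?_id_cons, List.foldl, Option.getD,
    PySem.List.sorted2, PySem.List.insertBy, if_true, List.filter,
    PySem.List.pyGetD]
  split_ifs <;>
    simp_all [pickA, PySem.List.insertBy, PySem.List.pyGet?, PySem.List.pyIdx?,
      PySem.List.len, max_def, beq_iff_eq] <;>
    (repeat' (split_ifs <;>
      simp_all [pickA, PySem.List.insertBy, PySem.List.pyGet?, PySem.List.pyIdx?,
        PySem.List.len, max_def, beq_iff_eq])) <;>
    (repeat' split) <;>
    ((try simp only [beq_iff_eq, beq_eq_false_iff_ne] at *) <;> first | rfl | omega)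

theorem solution_spec_aux : ∀ (answers : List Int), solution answers = solution_alt answers := by
  intro answers
  unfold solution solution_alt
  rw [loopA_S answers 0 0 0 0 (by omega) (by omega)]
  simp only [patternsB, List.map_cons, List.map_nil, scoreB_eq_S]
  unfold studentA1 studentA2 studentA3
  simpa using finish_eq (S (PySem.List.pyRepeat [1, 2, 3, 4, 5] 8) 0 answers)
    (S (PySem.List.pyRepeat [2, 1, 2, 3, 2, 4, 2, 5] 5) 0 answers)
    (S (PySem.List.pyRepeat [3, 3, 1, 1, 2, 2, 4, 4, 5, 5] 4) 0 answers)

-- ===== VERDICT (by name: the statement is the Claim_ definition above) =====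
theorem solution_spec : Claim_equal_solution := by
  intro answers _
  unfold Spec_solution
  exact solution_spec_aux answers
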